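-- pv_equiv track=rewrite | github.com/GundalaNikhil/DSA | dsa-problems/Bitwise/test_all_16_comprehensive.py | bit_005_solution
-- ===== SOURCE A (Python) =====
-- def bit_005_solution(n, start_idx, arr):
--     # Handle out of bounds start index
--     if start_idx >= n:
--         return 0
--
--     max_xor = 0
--     for i in range(start_idx, n):
--         curr_xor = 0
--         for j in range(start_idx, i + 1):
--             curr_xor ^= arr[j]
--             max_xor = max(max_xor, curr_xor)
--     return max_xor
-- ===== SOURCE B (Python) =====
-- def bit_005_solution(n, start_idx, arr):
--     # Two stages: build the list of prefix XORs of arr[start_idx..n-1]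
--     # (seeded with 0, matching the empty prefix), then take its maximum.
--     prefs = [0]
--     acc = 0
--     for j in range(start_idx, n):
--         acc ^= arr[j]
--         prefs.append(acc)
--     return max(prefs)
-- ===== Notes on version B (the rewrite author's own statement) =====
-- stated objective: alternative
-- what changed: Replaces the quadratic nested loops (recomputing every prefix XOR from scratch) by two staged linear passes: one building the list of running prefix XORs of the window (seeded with 0 for the empty prefix), then max over that list.
import Mathlib
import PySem

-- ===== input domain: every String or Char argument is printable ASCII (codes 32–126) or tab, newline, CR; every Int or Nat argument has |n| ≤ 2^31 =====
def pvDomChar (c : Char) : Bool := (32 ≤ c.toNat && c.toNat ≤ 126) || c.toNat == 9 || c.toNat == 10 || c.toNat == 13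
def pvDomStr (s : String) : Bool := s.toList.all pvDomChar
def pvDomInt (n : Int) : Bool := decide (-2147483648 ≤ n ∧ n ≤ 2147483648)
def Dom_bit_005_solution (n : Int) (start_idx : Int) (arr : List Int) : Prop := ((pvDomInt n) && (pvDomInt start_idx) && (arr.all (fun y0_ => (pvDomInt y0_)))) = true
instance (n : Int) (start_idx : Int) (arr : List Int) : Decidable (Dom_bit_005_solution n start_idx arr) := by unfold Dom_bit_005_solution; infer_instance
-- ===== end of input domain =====

-- B replaces A's nested loops by two staged linear passes: build the list of
-- running prefix XORs of the window (seeded with 0), then take its maximum (objective: alternative).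

-- ===== PORT A =====
-- literal transliteration of A's nested loops; arr[j] is in range on Pre_, so pyGetD is exact there
def bit_005_solution (n : Int) (start_idx : Int) (arr : List Int) : Int :=
  if start_idx ≥ n then 0
  else
    (PySem.List.pyRange start_idx n 1).foldl (fun max_xor i =>
      ((PySem.List.pyRange start_idx (i + 1) 1).foldl
        (fun (s : Int × Int) j =>
          let c := PySem.Int.bxor s.1 (PySem.List.pyGetD arr j 0)
          (c, max s.2 c)) ((0 : Int), max_xor)).2) 0

-- ===== PORT B =====
-- stage 1 builds prefs (a list, appended to like Python's prefs.append); stage 2 is max(prefs)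
def bit_005_solution_alt (n : Int) (start_idx : Int) (arr : List Int) : Int :=
  let prefs := ((PySem.List.pyRange start_idx n 1).foldl
    (fun (st : Int × List Int) j =>
      let acc := PySem.Int.bxor st.1 (PySem.List.pyGetD arr j 0)
      (acc, st.2 ++ [acc])) ((0 : Int), [(0 : Int)])).2
  match PySem.List.max? prefs (fun x => x) with
  | none => 0
  | some m => m

-- ===== PRECONDITION & SPEC =====
-- Pre_ excludes exactly the inputs where Python A raises IndexError (some accessed
-- index start_idx..n-1 outside [-len(arr), len(arr)-1]); B raises there too.
def Pre_bit_005_solution (n : Int) (start_idx : Int) (arr : List Int) : Prop :=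
  start_idx ≥ n ∨ (n ≤ (arr.length : Int) ∧ -(arr.length : Int) ≤ start_idx)
instance (n : Int) (start_idx : Int) (arr : List Int) : Decidable (Pre_bit_005_solution n start_idx arr) := by unfold Pre_bit_005_solution; infer_instance

def pvWitness_bit_005_solution : Int × Int × List Int := (3, 0, [1, 2, 3])

def Spec_bit_005_solution (n : Int) (start_idx : Int) (arr : List Int) (out : Int) : Prop := out = bit_005_solution_alt n start_idx arr
instance (n : Int) (start_idx : Int) (arr : List Int) (out : Int) : Decidable (Spec_bit_005_solution n start_idx arr out) := by unfold Spec_bit_005_solution; infer_instance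

-- ===== CLAIM (what is proved, stated in full; the proofs are below) =====
def Claim_equal_bit_005_solution : Prop := ∀ (n : Int) (start_idx : Int) (arr : List Int), Dom_bit_005_solution n start_idx arr → Pre_bit_005_solution n start_idx arr → Spec_bit_005_solution n start_idx arr (bit_005_solution n start_idx arr)

-- ===== LEMMAS AND PROOFS =====

-- A's inner-loop step: update the running XOR and the running maximum
def pvStep (g : Int → Int) (s : Int × Int) (j : Int) : Int × Int :=
  let c := PySem.Int.bxor s.1 (g j)
  (c, max s.2 c)

-- the list of running XOR prefixes over an index list
def pvPx (g : Int → Int) (acc : Int) : List Int → List Int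
  | [] => []
  | j :: L => let c := PySem.Int.bxor acc (g j); c :: pvPx g c L

-- the second component never decreases along the pvStep fold
theorem pvStep_snd_le (g : Int → Int) (L : List Int) :
    ∀ s : Int × Int, s.2 ≤ (L.foldl (pvStep g) s).2 := by
  induction L with
  | nil => intro s; simp
  | cons x L ih =>
    intro s
    calc s.2 ≤ (pvStep g s x).2 := le_max_left _ _
    _ ≤ _ := ih _

-- the maximum accumulator distributes over max
theorem pvStep_snd_max (g : Int → Int) (L : List Int) :
    ∀ (c m₁ m₂ : Int),
      (L.foldl (pvStep g) (c, max m₁ m₂)).2 = max m₁ (L.foldl (pvStep g) (c, m₂)).2 := by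
  induction L with
  | nil => intro c m₁ m₂; rfl
  | cons x L ih =>
    intro c m₁ m₂
    simp only [List.foldl_cons, pvStep, max_assoc]
    exact ih _ _ _

-- A's outer loop over i ∈ [a, b) equals one inner pass over [a, b)
theorem pvOuter_eq (g : Int → Int) (a : Int) :
    ∀ b : Int, a ≤ b →
      (PySem.List.pyRange a b 1).foldl (fun max_xor i =>
        ((PySem.List.pyRange a (i + 1) 1).foldl (pvStep g) ((0 : Int), max_xor)).2) 0
      = ((PySem.List.pyRange a b 1).foldl (pvStep g) ((0 : Int), (0 : Int))).2 := by
  intro b hb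
  induction b, hb using Int.le_induction with
  | base => simp [PySem.List.pyRange_one_eq_nil le_rfl]
  | succ b hab ih =>
    rw [PySem.List.pyRange_one_succ_right hab, List.foldl_append, List.foldl_append, ih]
    simp only [List.foldl_cons, List.foldl_nil]
    rw [PySem.List.pyRange_one_succ_right hab]
    set P := PySem.List.pyRange a b 1 with hP
    have h0 : (0 : Int) ≤ (P.foldl (pvStep g) ((0 : Int), (0 : Int))).2 :=
      pvStep_snd_le g P ((0 : Int), (0 : Int))
    have hmax : (P.foldl (pvStep g) ((0 : Int), (0 : Int))).2
        = max (P.foldl (pvStep g) ((0 : Int), (0 : Int))).2 0 := (max_eq_left h0).symm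
    rw [hmax, pvStep_snd_max]
    rw [List.foldl_append]
    simp only [List.foldl_cons, List.foldl_nil, pvStep]
    rw [max_eq_right]
    exact le_max_left _ _

-- A's single pvStep pass computes the running max (seeded m) of the prefix-XOR list
theorem pvStep_fold_eq_px (g : Int → Int) (L : List Int) :
    ∀ (acc m : Int), (L.foldl (pvStep g) (acc, m)).2 = (pvPx g acc L).foldl max m := by
  induction L with
  | nil => intro acc m; rfl
  | cons j L ih =>
    intro acc m
    simp only [List.foldl_cons, pvStep, pvPx]
    exact ih _ _

-- B's stage-1 fold appends exactly the prefix-XOR list to what is already built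
theorem pvBuild_eq_px (g : Int → Int) (L : List Int) :
    ∀ (acc : Int) (done : List Int),
      (L.foldl (fun (st : Int × List Int) j =>
        let c := PySem.Int.bxor st.1 (g j)
        (c, st.2 ++ [c])) (acc, done)).2 = done ++ pvPx g acc L := by
  induction L with
  | nil => intro acc done; simp [pvPx]
  | cons j L ih =>
    intro acc done
    simp only [List.foldl_cons, pvPx]
    rw [ih]
    simp

-- ===== VERDICT (by name: the statement is the Claim_ definition above) =====
theorem bit_005_solution_spec : Claim_equal_bit_005_solution := by
  intro n start_idx arr _ _
  show bit_005_solution n start_idx arr = bit_005_solution_alt n start_idx arr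
  unfold bit_005_solution bit_005_solution_alt
  rw [pvBuild_eq_px (fun j => PySem.List.pyGetD arr j 0) (PySem.List.pyRange start_idx n 1) 0 [0]]
  simp only [List.nil_append, List.cons_append, PySem.List.max?_id_cons]
  by_cases h : start_idx ≥ n
  · simp [h, PySem.List.pyRange_one_eq_nil h, pvPx]
  · have hle : start_idx ≤ n := (lt_of_not_ge h).le
    simp only [h, if_false]
    have hstep : (fun (s : Int × Int) (j : Int) =>
        (PySem.Int.bxor s.1 (PySem.List.pyGetD arr j 0),
          max s.2 (PySem.Int.bxor s.1 (PySem.List.pyGetD arr j 0))))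
        = pvStep (fun j => PySem.List.pyGetD arr j 0) := rfl
    rw [hstep, pvOuter_eq (fun j => PySem.List.pyGetD arr j 0) start_idx n hle]
    exact pvStep_fold_eq_px _ _ _ _
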